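-- pv_equiv track=rewrite | github.com/iinaki/tda-1C2024-mio | ejercicios-rpl/dinamica/londres-y-california.py | plan_operativo
-- ===== SOURCE A (Python) =====
-- def plan_operativo(arreglo_L, arreglo_C, costo_M):
--     n = len(arreglo_L)
--     OPTLondres = [0] * n
--     OPTCalifornia = [0] * n
--
--     OPTLondres[0] = arreglo_L[0]
--     OPTCalifornia[0] = arreglo_C[0]
--
--     for i in range(1, n):
--         OPTLondres[i] = arreglo_L[i] + min(OPTCalifornia[i-1] + costo_M, OPTLondres[i-1])
--         OPTCalifornia[i] = arreglo_C[i] + min(OPTLondres[i-1] + costo_M, OPTCalifornia[i-1])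
--
--     secuencia = [0] * n
--     if OPTLondres[-1] < OPTCalifornia[-1]:
--         secuencia[-1] = "Londres"
--         ciudad_actual = "Londres"
--     else:
--         secuencia[-1] = "California"
--         ciudad_actual = "California"
--
--     # Reconstruir
--     for i in range(n-2, -1, -1):
--         if ciudad_actual == "Londres":
--             if OPTLondres[i+1] == arreglo_L[i+1] + OPTLondres[i]:
--                 secuencia[i] = "Londres"
--             else:
--                 secuencia[i] = "California"
--                 ciudad_actual = "California"
--         else:
--             if OPTCalifornia[i+1] == arreglo_C[i+1] + OPTCalifornia[i]:
--                 secuencia[i] = "California"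
--             else:
--                 secuencia[i] = "Londres"
--                 ciudad_actual = "Londres"
--
--     return secuencia
-- ===== SOURCE B (Python) =====
-- def plan_operativo(arreglo_L, arreglo_C, costo_M):
--     # Single forward pass: carry, for each city, its best cost AND its best plan
--     # as a persistent linked list (shared tails), so no DP tables and no
--     # backtracking pass are needed; unwind the chosen list at the end.
--     optL, optC = arreglo_L[0], arreglo_C[0]
--     pathL = (None, "Londres")
--     pathC = (None, "California")
--     for l, c in zip(arreglo_L[1:], arreglo_C[1:]):
--         newL = l + min(optC + costo_M, optL)
--         newC = c + min(optL + costo_M, optC)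
--         pathL, pathC = ((pathL if optL <= optC + costo_M else pathC), "Londres"), \
--                        ((pathC if optC <= optL + costo_M else pathL), "California")
--         optL, optC = newL, newC
--     node = pathL if optL < optC else pathC
--     secuencia = []
--     while node is not None:
--         secuencia.append(node[1])
--         node = node[0]
--     secuencia.reverse()
--     return secuencia
-- ===== Notes on version B (the rewrite author's own statement) =====
-- stated objective: alternative
-- what changed: B replaces A's DP tables plus backward reconstruction by a single forward pass that carries, for each city, the best cost together with the best plan itself as a persistent linked list with shared tails; at the end it just unwinds the chosen list, so there is no backtracking over stored tables and no re-testing of cost equalities.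
import Mathlib
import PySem

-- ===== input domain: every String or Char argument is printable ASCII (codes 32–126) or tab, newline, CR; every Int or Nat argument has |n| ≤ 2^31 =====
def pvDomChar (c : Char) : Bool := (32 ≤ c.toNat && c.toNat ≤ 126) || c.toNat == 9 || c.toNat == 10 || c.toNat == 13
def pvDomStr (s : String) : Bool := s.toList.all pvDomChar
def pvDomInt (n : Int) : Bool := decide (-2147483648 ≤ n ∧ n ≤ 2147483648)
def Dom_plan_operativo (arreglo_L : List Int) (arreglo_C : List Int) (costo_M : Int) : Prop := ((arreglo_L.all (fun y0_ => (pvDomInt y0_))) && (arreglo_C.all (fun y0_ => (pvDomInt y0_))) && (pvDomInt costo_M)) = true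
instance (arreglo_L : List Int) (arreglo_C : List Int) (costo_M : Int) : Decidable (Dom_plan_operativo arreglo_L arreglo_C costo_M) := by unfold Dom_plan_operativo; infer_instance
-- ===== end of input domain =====

-- B is one forward pass carrying, per city, the best cost and the best plan as a
-- shared-tail list (no DP tables, no backward reconstruction); objective: alternative.
-- All pyGetD accesses below are in range under Pre_ (first list nonempty, second at
-- least as long), where they are exactly Python's xs[i]; i.toNat is exact since
-- every loop index is ≥ 0.

-- ===== PORT A =====
-- loop body of A's forward DP (OPTLondres[i] written first, then read back as in Python)
def pvBodyA (L C : List Int) (M : Int) (s : List Int × List Int) (i : Int) : List Int × List Int :=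
  let OL := s.1.set i.toNat (PySem.List.pyGetD L i 0 + min (PySem.List.pyGetD s.2 (i-1) 0 + M) (PySem.List.pyGetD s.1 (i-1) 0))
  let OC := s.2.set i.toNat (PySem.List.pyGetD C i 0 + min (PySem.List.pyGetD OL (i-1) 0 + M) (PySem.List.pyGetD s.2 (i-1) 0))
  (OL, OC)

-- loop body of A's reconstruction
def pvBodyRA (L C OL OC : List Int) (s : List String × String) (i : Int) : List String × String :=
  if s.2 = "Londres" then
    if PySem.List.pyGetD OL (i+1) 0 = PySem.List.pyGetD L (i+1) 0 + PySem.List.pyGetD OL i 0 then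
      (s.1.set i.toNat "Londres", s.2)
    else (s.1.set i.toNat "California", "California")
  else
    if PySem.List.pyGetD OC (i+1) 0 = PySem.List.pyGetD C (i+1) 0 + PySem.List.pyGetD OC i 0 then
      (s.1.set i.toNat "California", s.2)
    else (s.1.set i.toNat "Londres", "Londres")

def plan_operativo (arreglo_L : List Int) (arreglo_C : List Int) (costo_M : Int) : List String :=
  let n := arreglo_L.length
  -- OPTLondres[0] = arreglo_L[0]; for n = 0 Python raises IndexError (excluded by Pre_)
  let OPTLondres := (List.replicate n (0:Int)).set 0 (PySem.List.pyGetD arreglo_L 0 0)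
  let OPTCalifornia := (List.replicate n (0:Int)).set 0 (PySem.List.pyGetD arreglo_C 0 0)
  let st := (PySem.List.pyRange 1 (n:Int) 1).foldl (pvBodyA arreglo_L arreglo_C costo_M) (OPTLondres, OPTCalifornia)
  let secuencia : List String := List.replicate n ""
  -- secuencia[-1] = …: writes the last slot (exact for n ≥ 1, Pre_)
  let init : List String × String :=
    if PySem.List.pyGetD st.1 (-1) 0 < PySem.List.pyGetD st.2 (-1) 0 then
      (secuencia.set (n-1) "Londres", "Londres")
    else (secuencia.set (n-1) "California", "California")
  ((PySem.List.pyRange ((n:Int)-2) (-1) (-1)).foldl (pvBodyRA arreglo_L arreglo_C st.1 st.2) init).1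

-- ===== PORT B =====
-- loop body of B's forward pass: state = (optL, optC, pathL, pathC); Python's nested
-- pair (prev, city) is a cons list read head-first, so it is stored here as a
-- List String in reverse order (cons = Python's tuple nesting) and reversed at the end.
def pvStepB (M : Int) (s : Int × Int × List String × List String) (p : Int × Int) :
    Int × Int × List String × List String :=
  let newL := p.1 + min (s.2.1 + M) s.1
  let newC := p.2 + min (s.1 + M) s.2.1
  (newL, newC,
   "Londres" :: (if s.1 ≤ s.2.1 + M then s.2.2.1 else s.2.2.2),
   "California" :: (if s.2.1 ≤ s.1 + M then s.2.2.2 else s.2.2.1))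

def plan_operativo_alt (arreglo_L : List Int) (arreglo_C : List Int) (costo_M : Int) : List String :=
  let st := ((PySem.List.slice arreglo_L (some 1) none).zip (PySem.List.slice arreglo_C (some 1) none)).foldl
      (pvStepB costo_M)
      (PySem.List.pyGetD arreglo_L 0 0, PySem.List.pyGetD arreglo_C 0 0, ["Londres"], ["California"])
  (if st.1 < st.2.1 then st.2.2.1 else st.2.2.2).reverse

-- ===== PRECONDITION & SPEC =====
-- Python A raises IndexError exactly when arreglo_L is empty or arreglo_C is shorter than arreglo_L
def Pre_plan_operativo (arreglo_L : List Int) (arreglo_C : List Int) (costo_M : Int) : Prop :=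
  arreglo_L ≠ [] ∧ arreglo_L.length ≤ arreglo_C.length
instance (arreglo_L : List Int) (arreglo_C : List Int) (costo_M : Int) : Decidable (Pre_plan_operativo arreglo_L arreglo_C costo_M) := by unfold Pre_plan_operativo; infer_instance
def pvWitness_plan_operativo : List Int × List Int × Int := ([1, 5, 2], [4, 1, 3], 2)

def Spec_plan_operativo (arreglo_L : List Int) (arreglo_C : List Int) (costo_M : Int) (out : List String) : Prop := out = plan_operativo_alt arreglo_L arreglo_C costo_M
instance (arreglo_L : List Int) (arreglo_C : List Int) (costo_M : Int) (out : List String) : Decidable (Spec_plan_operativo arreglo_L arreglo_C costo_M out) := by unfold Spec_plan_operativo; infer_instance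

-- ===== CLAIM (what is proved, stated in full; the proofs are below) =====
def Claim_equal_plan_operativo : Prop := ∀ (arreglo_L : List Int) (arreglo_C : List Int) (costo_M : Int), Dom_plan_operativo arreglo_L arreglo_C costo_M → Pre_plan_operativo arreglo_L arreglo_C costo_M → Spec_plan_operativo arreglo_L arreglo_C costo_M (plan_operativo arreglo_L arreglo_C costo_M)

-- ===== LEMMAS AND PROOFS =====

-- reference DP: (OPTLondres[k], OPTCalifornia[k])
def pvDp (L C : List Int) (M : Int) : Nat → Int × Int
  | 0 => (L.getD 0 0, C.getD 0 0)
  | k+1 => ((L.getD (k+1) 0) + min ((pvDp L C M k).2 + M) (pvDp L C M k).1,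
            (C.getD (k+1) 0) + min ((pvDp L C M k).1 + M) (pvDp L C M k).2)

-- "stay" condition at position k (transition k-1 → k); index 0 is an unused sentinel
def pvStayL (L C : List Int) (M : Int) : Nat → Bool
  | 0 => true
  | j+1 => decide ((pvDp L C M j).1 ≤ (pvDp L C M j).2 + M)
def pvStayC (L C : List Int) (M : Int) : Nat → Bool
  | 0 => true
  | j+1 => decide ((pvDp L C M j).2 ≤ (pvDp L C M j).1 + M)

def pvName (b : Bool) : String := if b then "Londres" else "California"

-- city at position k-1 given city b at position k
def pvPrev (L C : List Int) (M : Int) (k : Nat) (b : Bool) : Bool :=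
  if b then (if pvStayL L C M k then b else !b) else (if pvStayC L C M k then b else !b)

-- optimal sequence for positions 0..k given city b at position k
def pvSeq (L C : List Int) (M : Int) : Nat → Bool → List String
  | 0, b => [pvName b]
  | k+1, b => pvSeq L C M k (pvPrev L C M (k+1) b) ++ [pvName b]

-- city at position 0 along that path
def pvCity0 (L C : List Int) (M : Int) : Nat → Bool → Bool
  | 0, b => b
  | k+1, b => pvCity0 L C M k (pvPrev L C M (k+1) b)

lemma pv_set_map_range {α : Type} (n : Nat) (f : Nat → α) (i : Nat) (v : α) :
    ((List.range n).map f).set i v = (List.range n).map (fun j => if j = i then v else f j) := by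
  apply List.ext_getElem
  · simp
  · intro j h1 h2
    simp only [List.length_set, List.length_map, List.length_range] at h1
    simp only [List.getElem_set, List.getElem_map, List.getElem_range]
    by_cases hj : j = i
    · simp [hj]
    · simp [hj]
      exact fun h => absurd h.symm hj

lemma pv_get_map_range {α : Type} [Inhabited α] (n : Nat) (f : Nat → α) (k : Nat) (d : α) (hk : k < n) :
    PySem.List.pyGetD ((List.range n).map f) (k : Int) d = f k := by
  rw [PySem.List.pyGetD_natCast]
  simp [List.getD, hk]

lemma pv_last_map_range {α : Type} [Inhabited α] (n : Nat) (f : Nat → α) (d : α) (hn : 0 < n) :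
    PySem.List.pyGetD ((List.range n).map f) (-1) d = f (n - 1) := by
  have hne : (List.range n).map f ≠ [] := by simp; omega
  rw [PySem.List.pyGetD_neg_one _ _ hne]
  rw [List.getLast_eq_getElem]
  simp

lemma pv_set_replicate_append {α : Type} (k : Nat) (x v : α) (rest : List α) :
    (List.replicate (k+1) x ++ rest).set k v = List.replicate k x ++ v :: rest := by
  induction k with
  | zero => simp
  | succ k ih =>
    rw [List.replicate_succ, List.cons_append, List.set_cons_succ, ih, List.replicate_succ]
    simp

lemma pv_set_replicate_last {α : Type} (k : Nat) (x v : α) :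
    (List.replicate (k+1) x).set k v = List.replicate k x ++ v :: [] := by
  have h := pv_set_replicate_append k x v []
  simpa using h

lemma pv_map_range_if {α : Type} (n : Nat) (f : Nat → α) (d : α) :
    (List.range n).map (fun j => if j < n then f j else d) = (List.range n).map f :=
  List.map_congr_left (fun a ha => by simp [List.mem_range.mp ha])

lemma pv_if_pairA (c : Prop) [Decidable c] (sec : List String) (i : Nat) :
    (if c then (sec.set i "Londres", ("Londres":String)) else (sec.set i "California", "California"))
    = (sec.set i (pvName (decide c)), pvName (decide c)) := by
  by_cases h : c <;> simp [pvName, h]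

lemma pv_fwdA (L C : List Int) (M : Int) (m : Nat) (hm1 : 1 ≤ m) (hm : m ≤ L.length) :
    (PySem.List.pyRange 1 (m:Int) 1).foldl (pvBodyA L C M)
      ((List.replicate L.length (0:Int)).set 0 (PySem.List.pyGetD L 0 0),
       (List.replicate L.length (0:Int)).set 0 (PySem.List.pyGetD C 0 0))
    = ((List.range L.length).map (fun j => if j < m then (pvDp L C M j).1 else 0),
       (List.range L.length).map (fun j => if j < m then (pvDp L C M j).2 else 0)) := by
  obtain ⟨j, rfl⟩ : ∃ j, m = j + 1 := ⟨m - 1, by omega⟩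
  clear hm1
  induction j with
  | zero =>
    rw [PySem.List.pyRange_one_eq_nil (by norm_num)]
    have hrep : (List.replicate L.length (0:Int)) = (List.range L.length).map (fun _ => (0:Int)) := by
      simp
    rw [hrep, pv_set_map_range, pv_set_map_range]
    simp only [List.foldl_nil]
    refine congrArg₂ _ ?_ ?_ <;>
    · refine congrArg (fun f => (List.range L.length).map f) (funext fun jj => ?_)
      rcases jj with _ | jj <;> simp [pvDp, PySem.List.pyGetD_zero]
  | succ j ih =>
    have h1 : ((j+1+1 : Nat) : Int) = ((j+1 : Nat) : Int) + 1 := by push_cast; ring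
    rw [h1, PySem.List.pyRange_one_succ_right (by exact_mod_cast Nat.one_le_iff_ne_zero.mpr (by omega)),
        List.foldl_append, ih (by omega)]
    simp only [List.foldl_cons, List.foldl_nil]
    show pvBodyA L C M _ _ = _
    have hj0 : j < L.length := by omega
    have hj1 : j + 1 < L.length := by omega
    have hc1 : ((j+1:Nat):Int) - 1 = ((j:Nat):Int) := by push_cast; ring
    have hne : j ≠ j + 1 := by omega
    simp only [pvBodyA, hc1, Int.toNat_natCast]
    rw [pv_get_map_range _ _ _ _ hj0, pv_get_map_range _ _ _ _ hj0,
        pv_set_map_range, pv_get_map_range _ _ _ _ hj0, pv_set_map_range]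
    refine congrArg₂ _ ?_ ?_ <;>
    · refine congrArg (fun f => (List.range L.length).map f) (funext fun jj => ?_)
      by_cases h1 : jj = j + 1
      · subst h1
        simp [pvDp, List.getD]
        rw [show ((j:Int)+1) = ((j+1:Nat):Int) by push_cast; ring, PySem.List.pyGetD_natCast]
        simp [List.getD]
      · by_cases h2 : jj < j + 1 <;> simp [h1, h2] <;> omega

lemma pv_condL (L C : List Int) (M : Int) (k : Nat) :
    ((pvDp L C M (k+1)).1 = (L.getD (k+1) 0) + (pvDp L C M k).1)
      ↔ (pvDp L C M k).1 ≤ (pvDp L C M k).2 + M := by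
  simp [pvDp]

lemma pv_condC (L C : List Int) (M : Int) (k : Nat) :
    ((pvDp L C M (k+1)).2 = (C.getD (k+1) 0) + (pvDp L C M k).2)
      ↔ (pvDp L C M k).2 ≤ (pvDp L C M k).1 + M := by
  simp [pvDp]

lemma pv_bodyRA_eval (L C : List Int) (M : Int) (k : Nat) (hk : k + 1 < L.length) (b : Bool) (sec : List String) :
    pvBodyRA L C ((List.range L.length).map (fun j => (pvDp L C M j).1))
                 ((List.range L.length).map (fun j => (pvDp L C M j).2))
      (sec, pvName b) (k : Int)
    = (sec.set k (pvName (pvPrev L C M (k+1) b)), pvName (pvPrev L C M (k+1) b)) := by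
  have hk0 : k < L.length := by omega
  have hc : ((k:Nat):Int) + 1 = ((k+1:Nat):Int) := by push_cast; ring
  rcases b with _ | _
  · simp only [pvBodyRA]
    rw [if_neg (show ¬ (pvName false = "Londres") by decide)]
    rw [hc, pv_get_map_range _ _ _ _ hk, pv_get_map_range _ _ _ _ hk0]
    rw [show PySem.List.pyGetD C ((k+1:Nat):Int) 0 = C.getD (k+1) 0 by rw [PySem.List.pyGetD_natCast]]
    by_cases hs : (pvDp L C M k).2 ≤ (pvDp L C M k).1 + M
    · rw [if_pos ((pv_condC L C M k).mpr hs)]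
      simp [pvPrev, pvStayC, pvName, hs, Int.toNat_natCast]
    · rw [if_neg (fun h => hs ((pv_condC L C M k).mp h))]
      simp [pvPrev, pvStayC, pvName, hs, Int.toNat_natCast]
  · simp only [pvBodyRA]
    rw [if_pos (show pvName true = "Londres" from rfl)]
    rw [hc, pv_get_map_range _ _ _ _ hk, pv_get_map_range _ _ _ _ hk0]
    rw [show PySem.List.pyGetD L ((k+1:Nat):Int) 0 = L.getD (k+1) 0 by rw [PySem.List.pyGetD_natCast]]
    by_cases hs : (pvDp L C M k).1 ≤ (pvDp L C M k).2 + M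
    · rw [if_pos ((pv_condL L C M k).mpr hs)]
      simp [pvPrev, pvStayL, pvName, hs, Int.toNat_natCast]
    · rw [if_neg (fun h => hs ((pv_condL L C M k).mp h))]
      simp [pvPrev, pvStayL, pvName, hs, Int.toNat_natCast]

lemma pv_recA (L C : List Int) (M : Int) (k : Nat) (b : Bool) (tail : List String)
    (hk : k + 1 < L.length) :
    (PySem.List.pyRange (k:Int) (-1) (-1)).foldl
      (pvBodyRA L C ((List.range L.length).map (fun j => (pvDp L C M j).1))
                    ((List.range L.length).map (fun j => (pvDp L C M j).2)))
      (List.replicate (k+1) "" ++ pvName b :: tail, pvName b)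
    = (pvSeq L C M (k+1) b ++ tail, pvName (pvCity0 L C M (k+1) b)) := by
  induction k generalizing b tail with
  | zero =>
    rw [PySem.List.pyRange_neg_one_cons (by norm_num), PySem.List.pyRange_neg_one_eq_nil (by norm_num)]
    simp only [List.foldl_cons, List.foldl_nil]
    rw [pv_bodyRA_eval L C M 0 hk b _]
    rw [pv_set_replicate_append]
    simp [pvSeq, pvCity0]
  | succ k ih =>
    rw [PySem.List.pyRange_neg_one_cons (by omega)]
    simp only [List.foldl_cons]
    rw [pv_bodyRA_eval L C M (k+1) hk b _]
    rw [pv_set_replicate_append]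
    rw [show ((k+1:Nat):Int) - 1 = ((k:Nat):Int) by push_cast; ring]
    rw [ih (pvPrev L C M (k+2) b) (pvName b :: tail) (by omega)]
    show _ = (pvSeq L C M (k+2) b ++ tail, pvName (pvCity0 L C M (k+2) b))
    rw [show pvSeq L C M (k+2) b = pvSeq L C M (k+1) (pvPrev L C M (k+2) b) ++ [pvName b] from rfl]
    rw [show pvCity0 L C M (k+2) b = pvCity0 L C M (k+1) (pvPrev L C M (k+2) b) from rfl]
    simp

-- A equals the reference optimal sequence (final city chosen by strict <, ties → California)
lemma pv_A_eq (L C : List Int) (M : Int) (hne : L ≠ []) :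
    plan_operativo L C M
    = pvSeq L C M (L.length - 1)
        (decide ((pvDp L C M (L.length - 1)).1 < (pvDp L C M (L.length - 1)).2)) := by
  have hn1 : 1 ≤ L.length := by rcases L with _ | ⟨x, xs⟩ <;> simp_all
  simp only [plan_operativo]
  rw [pv_fwdA L C M L.length hn1 le_rfl]
  simp only [pv_map_range_if]
  simp only [pv_last_map_range _ _ _ (show 0 < L.length by omega)]
  rw [pv_if_pairA]
  rcases Nat.lt_or_ge L.length 2 with h2 | h2
  · have h1 : L.length = 1 := by omega
    rw [h1]
    rw [show ((1:Nat):Int) - 2 = (-1:Int) by norm_num]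
    rw [PySem.List.pyRange_neg_one_eq_nil (by norm_num)]
    simp [pvSeq]
  · rw [show (List.replicate L.length ("":String)) = List.replicate ((L.length - 2) + 1 + 1) "" by
          congr 1; omega]
    rw [show L.length - 1 = (L.length - 2) + 1 by omega]
    rw [pv_set_replicate_last ((L.length-2)+1) ""]
    rw [show (L.length:Int) - 2 = ((L.length - 2:Nat):Int) by omega]
    rw [pv_recA L C M (L.length-2) _ [] (by omega)]
    simp

-- B's zip of the two tails, written positionally
lemma pv_zip_eq (L C : List Int) (h : L.length ≤ C.length) :
    L.tail.zip C.tail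
    = (List.range (L.length - 1)).map (fun j => (L.getD (j+1) 0, C.getD (j+1) 0)) := by
  apply List.ext_getElem
  · simp; omega
  · intro j h1 h2
    simp only [List.length_zip, List.length_tail] at h1
    simp only [List.getElem_zip, List.getElem_tail, List.getElem_map, List.getElem_range]
    have hjL : j + 1 < L.length := by omega
    have hjC : j + 1 < C.length := by omega
    simp [List.getD, hjL, hjC]

-- B's forward pass computes the DP values and the two reversed optimal sequences
lemma pv_fwdB (L C : List Int) (M : Int) (k : Nat) :
    ((List.range k).map (fun j => (L.getD (j+1) 0, C.getD (j+1) 0))).foldl (pvStepB M)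
      (L.getD 0 0, C.getD 0 0, ["Londres"], ["California"])
    = ((pvDp L C M k).1, (pvDp L C M k).2,
       (pvSeq L C M k true).reverse, (pvSeq L C M k false).reverse) := by
  induction k with
  | zero => simp [pvDp, pvSeq, pvName]
  | succ k ih =>
    rw [List.range_succ, List.map_append, List.foldl_append, ih]
    simp only [List.map_cons, List.map_nil, List.foldl_cons, List.foldl_nil]
    show pvStepB M _ _ = _
    simp only [pvStepB]
    refine congrArg₂ _ ?_ (congrArg₂ _ ?_ (congrArg₂ _ ?_ ?_))
    · simp [pvDp]
    · simp [pvDp]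
    · rw [show pvSeq L C M (k+1) true = pvSeq L C M k (pvPrev L C M (k+1) true) ++ [pvName true] from rfl]
      rw [List.reverse_append]
      by_cases hs : (pvDp L C M k).1 ≤ (pvDp L C M k).2 + M <;>
        simp [pvPrev, pvStayL, pvName, hs]
    · rw [show pvSeq L C M (k+1) false = pvSeq L C M k (pvPrev L C M (k+1) false) ++ [pvName false] from rfl]
      rw [List.reverse_append]
      by_cases hs : (pvDp L C M k).2 ≤ (pvDp L C M k).1 + M <;>
        simp [pvPrev, pvStayC, pvName, hs]

lemma pv_if_seq (L C : List Int) (M : Int) (k : Nat) (c : Prop) [Decidable c] :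
    (if c then pvSeq L C M k true else pvSeq L C M k false) = pvSeq L C M k (decide c) := by
  by_cases h : c <;> simp [h]

-- B equals the reference optimal sequence too
lemma pv_B_eq (L C : List Int) (M : Int) (hlen : L.length ≤ C.length) :
    plan_operativo_alt L C M
    = pvSeq L C M (L.length - 1)
        (decide ((pvDp L C M (L.length - 1)).1 < (pvDp L C M (L.length - 1)).2)) := by
  simp only [plan_operativo_alt, PySem.List.slice_from_one]
  rw [pv_zip_eq L C hlen,
      show PySem.List.pyGetD L 0 0 = L.getD 0 0 from PySem.List.pyGetD_zero L 0,
      show PySem.List.pyGetD C 0 0 = C.getD 0 0 from PySem.List.pyGetD_zero C 0,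
      pv_fwdB]
  rw [show (if (pvDp L C M (L.length-1)).1 < (pvDp L C M (L.length-1)).2 then
        (pvSeq L C M (L.length-1) true).reverse else (pvSeq L C M (L.length-1) false).reverse)
      = (if (pvDp L C M (L.length-1)).1 < (pvDp L C M (L.length-1)).2 then
        pvSeq L C M (L.length-1) true else pvSeq L C M (L.length-1) false).reverse by
        split_ifs <;> rfl]
  rw [pv_if_seq, List.reverse_reverse]

-- ===== VERDICT (by name: the statement is the Claim_ definition above) =====
theorem plan_operativo_spec : Claim_equal_plan_operativo := by
  intro L C M _ hpre
  obtain ⟨hne, hlen⟩ := hpre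
  unfold Spec_plan_operativo
  rw [pv_A_eq L C M hne, pv_B_eq L C M hlen]
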